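-- pv_equiv track=rewrite | github.com/AZelinsky96/plan_parser | plan_parser/file_handlers/plan_handler.py | create_zip_code_collections
-- ===== SOURCE A (Python) =====
-- def create_zip_code_collections(zip_codes):
--     zip_code_info = {
--
--     }
--
--     for line in zip_codes:
--         zip_ = line[0]
--         insert_value = (line[1], line[-1])
--         if zip_ not in zip_code_info:
--             zip_code_info[zip_] = {
--                 "identifying_area": [insert_value]
--             }
--
--         else:
--             if insert_value not in zip_code_info[zip_]['identifying_area']:
--                 zip_code_info[zip_]['identifying_area'].append(insert_value)
--
--     return zip_code_info
-- ===== SOURCE B (Python) =====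
-- def create_zip_code_collections(zip_codes):
--     # pass 1: distinct zips in first-occurrence order
--     keys = list(dict.fromkeys(line[0] for line in zip_codes))
--     # pass 2: for each zip, scan the whole input collecting its deduplicated pairs
--     return {
--         k: {"identifying_area":
--             list(dict.fromkeys((line[1], line[-1])
--                                for line in zip_codes if line[0] == k))}
--         for k in keys
--     }
-- ===== Notes on version B (the rewrite author's own statement) =====
-- stated objective: alternative
-- what changed: Replaces A's single fold over an incrementally-updated nested dict (membership-check-then-append inside the loop) by two staged passes: first compute the distinct zips in first-occurrence order, then for each zip scan the input and deduplicate its pairs with dict.fromkeys; no dict is mutated while looping.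
import Mathlib
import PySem

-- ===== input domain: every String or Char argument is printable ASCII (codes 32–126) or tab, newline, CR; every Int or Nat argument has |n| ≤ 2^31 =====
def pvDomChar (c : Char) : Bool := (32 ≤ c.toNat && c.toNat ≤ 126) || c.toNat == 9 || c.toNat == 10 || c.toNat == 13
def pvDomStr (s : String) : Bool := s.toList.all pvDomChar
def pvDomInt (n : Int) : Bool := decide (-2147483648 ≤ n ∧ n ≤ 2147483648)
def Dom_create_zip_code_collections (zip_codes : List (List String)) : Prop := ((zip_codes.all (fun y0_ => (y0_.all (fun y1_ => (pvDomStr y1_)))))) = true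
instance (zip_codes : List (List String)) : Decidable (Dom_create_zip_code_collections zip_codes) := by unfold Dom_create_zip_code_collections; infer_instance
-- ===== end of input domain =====

-- B replaces A's single fold over an incrementally-updated nested dict by two staged passes:
-- distinct zips first, then a per-zip scan with dict.fromkeys dedup (objective: alternative).

-- ===== PORT A =====
-- one loop iteration of A: membership-checked append into the nested dict
def czcStepA (d : PySem.Dict String (PySem.Dict String (List (String × String))))
    (line : List String) : PySem.Dict String (PySem.Dict String (List (String × String))) :=
  let zip_ := (PySem.List.pyGet? line 0).getD ""          -- line[0]; total form, exact under Pre_ (every line has ≥ 2 elements)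
  let iv : String × String :=
    ((PySem.List.pyGet? line 1).getD "", (PySem.List.pyGet? line (-1)).getD "")
  if d.contains zip_ then
    d.modify zip_ PySem.Dict.empty
      (fun inner => inner.modify "identifying_area" []
        (fun lst => if lst.contains iv then lst else lst ++ [iv]))
  else
    d.insert zip_ (PySem.Dict.ofList [("identifying_area", [iv])])

def create_zip_code_collections (zip_codes : List (List String)) :
    List (String × List (String × List (String × String))) :=
  ((zip_codes.foldl czcStepA PySem.Dict.empty).items).map (fun p => (p.1, p.2.items))

-- ===== PORT B =====
def create_zip_code_collections_alt (zip_codes : List (List String)) :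
    List (String × List (String × List (String × String))) :=
  -- pass 1: keys = list(dict.fromkeys(line[0] for line in zip_codes))
  let keys := PySem.List.dedup (zip_codes.map (fun line => (PySem.List.pyGet? line 0).getD ""))
  -- pass 2: per-key scan of zip_codes, dedup with dict.fromkeys
  keys.map (fun k =>
    (k, [("identifying_area",
      PySem.List.dedup ((zip_codes.filter
          (fun line => (PySem.List.pyGet? line 0).getD "" == k)).map
        (fun line => ((PySem.List.pyGet? line 1).getD "", (PySem.List.pyGet? line (-1)).getD ""))))]))

-- ===== PRECONDITION & SPEC =====
-- Pre_ excludes inputs containing a line with fewer than two elements: on those both A and B raise IndexError.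
def Pre_create_zip_code_collections (zip_codes : List (List String)) : Prop :=
  ∀ line ∈ zip_codes, 2 ≤ line.length
instance (zip_codes : List (List String)) : Decidable (Pre_create_zip_code_collections zip_codes) := by
  unfold Pre_create_zip_code_collections; infer_instance
def pvWitness_create_zip_code_collections : List (List String) :=
  [["10001", "NY", "New York"], ["10001", "NY", "New York"], ["90210", "CA", "LA"]]

def Spec_create_zip_code_collections (zip_codes : List (List String))
    (out : List (String × List (String × List (String × String)))) : Prop :=
  out = create_zip_code_collections_alt zip_codes
instance (zip_codes : List (List String)) (out : List (String × List (String × List (String × String)))) :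
    Decidable (Spec_create_zip_code_collections zip_codes out) := by
  unfold Spec_create_zip_code_collections; infer_instance

-- ===== CLAIM (what is proved, stated in full; the proofs are below) =====
def Claim_equal_create_zip_code_collections : Prop :=
  ∀ (zip_codes : List (List String)), Dom_create_zip_code_collections zip_codes →
    Pre_create_zip_code_collections zip_codes →
    Spec_create_zip_code_collections zip_codes (create_zip_code_collections zip_codes)

-- ===== LEMMAS AND PROOFS =====

def czcKey (line : List String) : String := (PySem.List.pyGet? line 0).getD ""
def czcPair (line : List String) : String × String :=
  ((PySem.List.pyGet? line 1).getD "", (PySem.List.pyGet? line (-1)).getD "")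
def czcPairs (xs : List (List String)) (k : String) : List (String × String) :=
  (xs.filter (fun l => czcKey l == k)).map czcPair

-- the closed form of A's dict after processing the prefix xs
def czcSpec (xs : List (List String)) :
    PySem.Dict String (PySem.Dict String (List (String × String))) :=
  PySem.Dict.mk ((PySem.List.dedup (xs.map czcKey)).map (fun k =>
    (k, PySem.Dict.mk [("identifying_area", PySem.List.dedup (czcPairs xs k))])))

theorem czc_keys_spec (xs : List (List String)) :
    (czcSpec xs).keys = PySem.List.dedup (xs.map czcKey) := by
  simp [czcSpec, PySem.Dict.keys, List.map_map, Function.comp_def]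

theorem czc_dedup_append {α : Type} [BEq α] (l : List α) (v : α) :
    PySem.List.dedup (l ++ [v]) =
      if (PySem.List.dedup l).contains v then PySem.List.dedup l
      else PySem.List.dedup l ++ [v] := by
  simp [PySem.List.dedup, PySem.Set.ofList, List.foldl_append, PySem.Set.add, PySem.Set.contains]

theorem czc_pairs_append (xs : List (List String)) (l : List String) (k : String) :
    czcPairs (xs ++ [l]) k =
      czcPairs xs k ++ (if czcKey l == k then [czcPair l] else []) := by
  simp only [czcPairs, List.filter_append]
  by_cases h : czcKey l == k <;> simp [h]

theorem czc_modify_singleton (x : List (String × String))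
    (g : List (String × String) → List (String × String)) :
    (PySem.Dict.mk [("identifying_area", x)]).modify "identifying_area" [] g
      = PySem.Dict.mk [("identifying_area", g x)] := by
  have hc : (PySem.Dict.mk [("identifying_area", x)]).contains "identifying_area" = true := by
    simp
  have hg : (PySem.Dict.mk [("identifying_area", x)]).getD "identifying_area" [] = x := by
    rw [PySem.Dict.getD_eq_get?_getD, PySem.Dict.get?_mk_cons]; simp
  show (PySem.Dict.mk [("identifying_area", x)]).insert "identifying_area"
      (g ((PySem.Dict.mk [("identifying_area", x)]).getD "identifying_area" [])) = _
  apply PySem.Dict.ext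
  rw [PySem.Dict.items_insert_of_contains _ _ hc, hg]
  simp

theorem czc_step (xs : List (List String)) (l : List String) :
    czcStepA (czcSpec xs) l = czcSpec (xs ++ [l]) := by
  unfold czcStepA
  dsimp only
  have hzr : (PySem.List.pyGet? l 0).getD "" = czcKey l := rfl
  have hiv : ((PySem.List.pyGet? l 1).getD "", (PySem.List.pyGet? l (-1)).getD "")
      = czcPair l := rfl
  rw [hzr, hiv]
  have hnd : (czcSpec xs).keys.Nodup := by
    rw [czc_keys_spec]; exact PySem.List.nodup_dedup _
  have hcontains : (czcSpec xs).contains (czcKey l)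
      = ((xs.map czcKey).contains (czcKey l)) := by
    rw [PySem.Dict.contains_eq_decide_mem_keys, czc_keys_spec]
    simp
  have hkeys : PySem.List.dedup ((xs ++ [l]).map czcKey)
      = if (xs.map czcKey).contains (czcKey l) then PySem.List.dedup (xs.map czcKey)
        else PySem.List.dedup (xs.map czcKey) ++ [czcKey l] := by
    rw [List.map_append]
    simp only [List.map_cons, List.map_nil]
    rw [czc_dedup_append]
    congr 1
    simp
  by_cases hc : (xs.map czcKey).contains (czcKey l) = true
  · rw [hcontains, if_pos hc]
    have hzmem : czcKey l ∈ xs.map czcKey := by simpa using hc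
    have hzded : czcKey l ∈ PySem.List.dedup (xs.map czcKey) := by
      rw [PySem.List.mem_dedup]; exact hzmem
    have hitem : (czcKey l, PySem.Dict.mk [("identifying_area", PySem.List.dedup (czcPairs xs (czcKey l)))])
        ∈ (czcSpec xs).items := by
      simp only [czcSpec]
      exact List.mem_map_of_mem hzded
    have hgv : (czcSpec xs).getD (czcKey l) PySem.Dict.empty
        = PySem.Dict.mk [("identifying_area", PySem.List.dedup (czcPairs xs (czcKey l)))] :=
      PySem.Dict.getD_of_mem_items _ hitem hnd _
    have hcz : (czcSpec xs).contains (czcKey l) = true := by rw [hcontains]; exact hc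
    show (czcSpec xs).insert (czcKey l) _ = czcSpec (xs ++ [l])
    apply PySem.Dict.ext
    rw [PySem.Dict.items_insert_of_contains _ _ hcz, hgv]
    simp only [czc_modify_singleton]
    simp only [czcSpec, hkeys, if_pos hc, List.map_map]
    refine List.map_congr_left (fun k hk => ?_)
    by_cases hkz : (k == czcKey l) = true
    · have hkz' : k = czcKey l := by simpa using hkz
      simp only [Function.comp_apply, hkz, if_pos]
      rw [hkz']
      have hpe : PySem.List.dedup (czcPairs (xs ++ [l]) (czcKey l))
          = if (PySem.List.dedup (czcPairs xs (czcKey l))).contains (czcPair l)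
            then PySem.List.dedup (czcPairs xs (czcKey l))
            else PySem.List.dedup (czcPairs xs (czcKey l)) ++ [czcPair l] := by
        rw [czc_pairs_append, if_pos (by simp), czc_dedup_append]
      rw [hpe]
    · have hne : ¬ k = czcKey l := by simpa using hkz
      simp only [Function.comp_apply, hkz, Bool.false_eq_true, if_false]
      have hpe : czcPairs (xs ++ [l]) k = czcPairs xs k := by
        rw [czc_pairs_append, if_neg (by simpa using fun h => hne h.symm), List.append_nil]
      rw [hpe]
  · have hcb : (xs.map czcKey).contains (czcKey l) = false := by simpa using hc
    rw [hcontains, hcb]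
    simp only [Bool.false_eq_true, if_false]
    show (czcSpec xs).insert (czcKey l) _ = czcSpec (xs ++ [l])
    have hcz : (czcSpec xs).contains (czcKey l) = false := by rw [hcontains]; exact hcb
    apply PySem.Dict.ext
    rw [PySem.Dict.items_insert_of_not_contains _ _ hcz]
    simp only [czcSpec]
    rw [hkeys, if_neg (by rw [hcb]; exact Bool.false_ne_true), List.map_append, List.map_singleton]
    congr 1
    · refine List.map_congr_left (fun k hk => ?_)
      have hkmem : k ∈ xs.map czcKey := by
        rw [← PySem.List.mem_dedup]; exact hk
      have hne : ¬ (czcKey l == k) = true := by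
        simp only [beq_iff_eq]
        intro h
        have hforall : ∀ x ∈ xs, ¬ czcKey x = czcKey l := by simpa using hcb
        obtain ⟨a, ha, hak⟩ := List.mem_map.mp hkmem
        exact hforall a ha (by rw [hak, ← h])
      have hpe : czcPairs (xs ++ [l]) k = czcPairs xs k := by
        rw [czc_pairs_append, if_neg hne, List.append_nil]
      rw [hpe]
    · have hz0 : czcPairs xs (czcKey l) = [] := by
        simp only [czcPairs]
        rw [List.map_eq_nil_iff, List.filter_eq_nil_iff]
        intro a ha
        simp only [beq_iff_eq]
        intro h
        have hforall : ∀ x ∈ xs, ¬ czcKey x = czcKey l := by simpa using hcb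
        exact absurd h (hforall a ha)
      have hpe : czcPairs (xs ++ [l]) (czcKey l) = [czcPair l] := by
        rw [czc_pairs_append, if_pos (by simp), hz0, List.nil_append]
      rw [hpe]
      rfl

theorem czc_fold (xs : List (List String)) :
    xs.foldl czcStepA PySem.Dict.empty = czcSpec xs := by
  induction xs using List.reverseRecOn with
  | nil => rfl
  | append_singleton ys l ih =>
    rw [List.foldl_append, List.foldl_cons, List.foldl_nil, ih, czc_step]

-- ===== VERDICT (by name: the statement is the Claim_ definition above) =====
theorem create_zip_code_collections_spec : Claim_equal_create_zip_code_collections := by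
  intro zs _ _
  unfold Spec_create_zip_code_collections create_zip_code_collections create_zip_code_collections_alt
  rw [czc_fold]
  simp only [czcSpec, List.map_map]
  exact List.map_congr_left (fun k _ => rfl)
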